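-- pv_equiv track=rewrite | github.com/gbcolborne/ner_eval | eval/hardeval.py | get_word_label_count_dict
-- ===== SOURCE A (Python) =====
-- def get_word_label_count_dict(tokens, labels):
--     """Given a list of tokens and a list of labels, make a dict that maps
--     words to a dict that maps labels to the frequency of the label
--     given the word.
--
--     """
--     word_label_count = {}
--     for word, label in zip(tokens, labels):
--         if word not in word_label_count:
--             word_label_count[word] = {}
--         if label not in word_label_count[word]:
--             word_label_count[word][label] = 0
--         word_label_count[word][label] += 1
--     return word_label_count
-- ===== SOURCE B (Python) =====
-- def get_word_label_count_dict(tokens, labels):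
--     """Group labels by word in one pass, then turn each word's label list
--     into a first-seen-order frequency dict in a second pass."""
--     groups = {}
--     for word, label in zip(tokens, labels):
--         groups.setdefault(word, []).append(label)
--     return {word: {lab: ls.count(lab) for lab in dict.fromkeys(ls)}
--             for word, ls in groups.items()}
-- ===== Notes on version B (the rewrite author's own statement) =====
-- stated objective: idiomatic
-- what changed: A's single lazy-create-and-increment loop over nested dicts is replaced by a group-then-aggregate decomposition: one pass groups labels per word via setdefault/append, then a comprehension converts each word's label list to a first-seen-order frequency dict via list.count.
import Mathlib
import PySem

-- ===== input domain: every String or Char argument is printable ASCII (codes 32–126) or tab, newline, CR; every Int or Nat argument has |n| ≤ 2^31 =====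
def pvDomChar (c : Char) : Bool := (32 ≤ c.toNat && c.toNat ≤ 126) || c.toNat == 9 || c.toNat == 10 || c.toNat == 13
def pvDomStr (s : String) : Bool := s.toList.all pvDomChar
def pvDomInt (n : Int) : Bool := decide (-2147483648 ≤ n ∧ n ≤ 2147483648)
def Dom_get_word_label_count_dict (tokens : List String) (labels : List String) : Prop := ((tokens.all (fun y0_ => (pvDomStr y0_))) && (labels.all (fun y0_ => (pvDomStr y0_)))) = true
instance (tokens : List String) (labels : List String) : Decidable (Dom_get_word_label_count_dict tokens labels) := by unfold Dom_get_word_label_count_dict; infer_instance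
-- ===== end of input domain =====

-- B replaces A's single lazy-create-and-increment loop by a group-then-aggregate
-- decomposition (group labels per word, then count each group); same result, chosen
-- for being more idiomatic, not for speed.

-- ===== PORT A =====
-- A's loop body: lazily create the inner dict, lazily create the label entry, increment it.
def pvStepA (d : PySem.Dict String (PySem.Dict String Int)) (p : String × String) :
    PySem.Dict String (PySem.Dict String Int) :=
  let d := if d.contains p.1 then d else d.insert p.1 PySem.Dict.empty
  let inner := d.getD p.1 PySem.Dict.empty
  let inner := if inner.contains p.2 then inner else inner.insert p.2 (0 : Int)
  d.insert p.1 (inner.insert p.2 (inner.getD p.2 0 + 1))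

def get_word_label_count_dict (tokens : List String) (labels : List String) :
    List (String × List (String × Int)) :=
  let wlc := (tokens.zip labels).foldl pvStepA PySem.Dict.empty
  wlc.items.map (fun p => (p.1, p.2.items))

-- ===== PORT B =====
def get_word_label_count_dict_alt (tokens : List String) (labels : List String) :
    List (String × List (String × Int)) :=
  let groups := (tokens.zip labels).foldl
    (fun d p => d.modify p.1 [] (· ++ [p.2])) PySem.Dict.empty
  groups.items.map (fun p =>
    (p.1, (PySem.Set.ofList p.2).map (fun lab => (lab, (p.2.count lab : Int)))))

-- ===== PRECONDITION & SPEC =====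
def Spec_get_word_label_count_dict (tokens : List String) (labels : List String) (out : List (String × List (String × Int))) : Prop := out = get_word_label_count_dict_alt tokens labels
instance (tokens : List String) (labels : List String) (out : List (String × List (String × Int))) : Decidable (Spec_get_word_label_count_dict tokens labels out) := by unfold Spec_get_word_label_count_dict; infer_instance

-- ===== CLAIM (what is proved, stated in full; the proofs are below) =====
def Claim_equal_get_word_label_count_dict : Prop := ∀ (tokens : List String) (labels : List String), Dom_get_word_label_count_dict tokens labels → Spec_get_word_label_count_dict tokens labels (get_word_label_count_dict tokens labels)

-- ===== LEMMAS AND PROOFS =====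

-- the entry-wise correspondence between A's dict-of-dicts and B's dict-of-lists
def pvRel (p : String × List String) : String × PySem.Dict String Int :=
  (p.1, PySem.Dict.counter p.2)

lemma pv_contains_of_rel (d : PySem.Dict String (PySem.Dict String Int))
    (g : PySem.Dict String (List String)) (h : d.items = g.items.map pvRel) (k : String) :
    d.contains k = g.contains k := by
  simp [PySem.Dict.contains, h, List.any_map, pvRel, Function.comp_def]

lemma pv_stepA_modify (c : PySem.Dict String Int) (lab : String) :
    (let inner := if c.contains lab then c else c.insert lab (0 : Int)
     inner.insert lab (inner.getD lab 0 + 1)) = c.modify lab 0 (· + 1) := by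
  by_cases hc : c.contains lab
  · simp [hc, PySem.Dict.modify]
  · simp [hc, PySem.Dict.modify, PySem.Dict.insert_insert_self,
      PySem.Dict.getD_insert_self]
    rw [PySem.Dict.getD_of_not_contains c 0 (by simp [hc])]
    norm_num

lemma pv_inv (l : List (String × String)) (d : PySem.Dict String (PySem.Dict String Int))
    (g : PySem.Dict String (List String)) (hnd : g.keys.Nodup)
    (h : d.items = g.items.map pvRel) :
    (l.foldl pvStepA d).items
      = (l.foldl (fun d p => d.modify p.1 [] (· ++ [p.2])) g).items.map pvRel := by
  induction l generalizing d g with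
  | nil => exact h
  | cons p l ih =>
    simp only [List.foldl_cons]
    have hdnd : d.keys.Nodup := by
      simpa [PySem.Dict.keys, h, List.map_map, pvRel, Function.comp] using hnd
    apply ih
    · have := PySem.Dict.keys_modify g p.1 [] (· ++ [p.2])
      by_cases hc : g.contains p.1
      · rw [this, PySem.Dict.keys_insert_of_contains _ _ hc]; exact hnd
      · rw [this, PySem.Dict.keys_insert_of_not_contains _ _ (by simp [hc])]
        have hnm : p.1 ∉ g.keys := by
          simpa [PySem.Dict.contains_iff_mem_keys] using hc
        simp [List.nodup_append, hnd]
        exact fun a ha he => hnm (he ▸ ha)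
    · -- one step preserves the correspondence
      have hcc := pv_contains_of_rel d g h p.1
      by_cases hc : g.contains p.1
      · -- existing word
        obtain ⟨ls, hmem⟩ : ∃ ls, (p.1, ls) ∈ g.items := by
          have := (PySem.Dict.contains_iff_mem_keys g p.1).mp hc
          simp only [PySem.Dict.keys, List.mem_map] at this
          obtain ⟨q, hq, hq1⟩ := this
          exact ⟨q.2, by simpa [← hq1] using hq⟩
        have hgD : g.getD p.1 [] = ls := PySem.Dict.getD_of_mem_items g hmem hnd []
        have hdD : d.getD p.1 PySem.Dict.empty = PySem.Dict.counter ls := by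
          have hmem' : (p.1, PySem.Dict.counter ls) ∈ d.items := by
            rw [h]; exact List.mem_map.mpr ⟨(p.1, ls), hmem, rfl⟩
          exact PySem.Dict.getD_of_mem_items d hmem' hdnd _
        have hstep : pvStepA d p
            = d.insert p.1 (PySem.Dict.counter (ls ++ [p.2])) := by
          rw [PySem.Dict.counter_append_singleton, ← pv_stepA_modify]
          simp only [pvStepA, hcc, hc, if_true, hdD]
        rw [hstep, PySem.Dict.items_insert_of_contains _ _ (hcc.trans hc),
            PySem.Dict.modify, hgD,
            PySem.Dict.items_insert_of_contains _ _ hc, h,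
            List.map_map, List.map_map]
        apply List.map_congr_left
        intro q _
        by_cases hq : q.1 = p.1 <;> simp [pvRel, Function.comp, hq]
      · -- fresh word
        have hc' : d.contains p.1 = false := by simp [hcc, hc]
        have h3 : PySem.Dict.counter [p.2]
            = (PySem.Dict.empty : PySem.Dict String Int).modify p.2 0 (· + 1) := by
          rw [show [p.2] = [] ++ [p.2] from rfl, PySem.Dict.counter_append_singleton]
          rfl
        have hstep : pvStepA d p
            = d.insert p.1 (PySem.Dict.counter [p.2]) := by
          simp [pvStepA, hc', h3, PySem.Dict.modify, PySem.Dict.getD_insert_self,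
            PySem.Dict.insert_insert_self, PySem.Dict.contains_empty, PySem.Dict.getD_empty]
        rw [hstep, PySem.Dict.items_insert_of_not_contains _ _ (by simp [hcc, hc]),
            PySem.Dict.modify, PySem.Dict.getD_of_not_contains g _ (by simp [hc]),
            PySem.Dict.items_insert_of_not_contains _ _ (by simp [hc]), h]
        simp [pvRel]

-- ===== VERDICT (by name: the statement is the Claim_ definition above) =====
theorem get_word_label_count_dict_spec : Claim_equal_get_word_label_count_dict := by
  intro tokens labels _
  unfold Spec_get_word_label_count_dict get_word_label_count_dict get_word_label_count_dict_alt
  simp only [pv_inv (tokens.zip labels) PySem.Dict.empty PySem.Dict.empty (by simp) rfl,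
    List.map_map]
  apply List.map_congr_left
  intro q _
  simp [pvRel, Function.comp, PySem.Dict.items_counter]
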